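-- pv_equiv track=rewrite | github.com/pt1243/advent-of-code | 2022/16.py | calculate_pressure_released
-- ===== SOURCE A (Python) =====
-- from collections.abc import Mapping, Sequence
-- from itertools import combinations, pairwise
--
-- def calculate_pressure_released(
--     path: Sequence[str],
--     valve_flow_rates: Mapping[str, int],
--     distances_between_valves: Mapping[str, Mapping[str, int]],
--     distances_from_AA: Mapping[str, int],
--     time_available: int,
-- ) -> int:
--     pressure_released = 0
--     pressure_per_minute = 0
--     minute = 1 + distances_from_AA[path[0]]
--     for valve_1, valve_2 in pairwise(path):
--         travel_time = 1 + distances_between_valves[valve_1][valve_2]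
--         minute += travel_time
--         pressure_per_minute += valve_flow_rates[valve_1]
--         pressure_released += travel_time * pressure_per_minute
--     pressure_per_minute += valve_flow_rates[path[-1]]
--     pressure_released += (time_available - minute) * pressure_per_minute
--     return pressure_released
-- ===== SOURCE B (Python) =====
-- from itertools import accumulate, pairwise
--
--
-- def calculate_pressure_released(
--     path,
--     valve_flow_rates,
--     distances_between_valves,
--     distances_from_AA,
--     time_available,
-- ):
--     # Compute each valve's opening minute by a prefix scan over the travel
--     # times, then sum each valve's full lifetime contribution in one shot.
--     opening_minutes = list(accumulate(
--         (1 + distances_between_valves[a][b] for a, b in pairwise(path)),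
--         initial=1 + distances_from_AA[path[0]],
--     ))
--     return sum(
--         valve_flow_rates[valve] * (time_available - minute)
--         for valve, minute in zip(path, opening_minutes)
--     )
-- ===== Notes on version B (the rewrite author's own statement) =====
-- stated objective: alternative
-- what changed: B replaces A's running pressure_per_minute accumulated segment-by-segment with a prefix scan of opening minutes followed by a closed-form per-valve contribution sum (reordering the double summation).
import Mathlib
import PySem

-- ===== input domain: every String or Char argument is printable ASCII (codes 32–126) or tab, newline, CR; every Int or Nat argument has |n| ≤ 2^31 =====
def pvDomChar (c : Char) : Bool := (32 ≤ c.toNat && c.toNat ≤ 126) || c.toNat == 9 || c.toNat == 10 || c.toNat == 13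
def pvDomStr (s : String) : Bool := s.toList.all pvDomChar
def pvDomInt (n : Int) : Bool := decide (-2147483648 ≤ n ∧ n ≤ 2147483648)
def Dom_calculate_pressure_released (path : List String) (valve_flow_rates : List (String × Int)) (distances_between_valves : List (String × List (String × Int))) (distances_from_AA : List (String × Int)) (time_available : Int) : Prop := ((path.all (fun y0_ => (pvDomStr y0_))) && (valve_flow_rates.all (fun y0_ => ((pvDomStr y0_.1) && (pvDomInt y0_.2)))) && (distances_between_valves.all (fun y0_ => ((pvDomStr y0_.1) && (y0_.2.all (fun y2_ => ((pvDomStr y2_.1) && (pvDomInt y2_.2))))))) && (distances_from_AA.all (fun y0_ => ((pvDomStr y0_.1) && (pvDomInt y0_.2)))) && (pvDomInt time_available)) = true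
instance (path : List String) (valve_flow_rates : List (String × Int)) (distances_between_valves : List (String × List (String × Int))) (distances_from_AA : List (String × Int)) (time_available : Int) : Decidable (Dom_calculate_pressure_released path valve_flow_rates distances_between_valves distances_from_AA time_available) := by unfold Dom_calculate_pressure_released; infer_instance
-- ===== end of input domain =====

-- B replaces A's running pressure_per_minute with a prefix scan of opening minutes plus a
-- closed-form per-valve contribution sum; same result, proved equivalent on Pre_ (all keys present).

-- dict lookup d[k] (first match per the association-list convention); Pre_ guarantees presence
def pvGetI (d : List (String × Int)) (k : String) : Int := (d.lookup k).getD 0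
def pvGetL (d : List (String × List (String × Int))) (k : String) : List (String × Int) := (d.lookup k).getD []

-- ===== PORT A =====
def calculate_pressure_released (path : List String) (valve_flow_rates : List (String × Int)) (distances_between_valves : List (String × List (String × Int))) (distances_from_AA : List (String × Int)) (time_available : Int) : Int :=
  -- minute = 1 + distances_from_AA[path[0]]; state (minute, pressure_per_minute, pressure_released)
  let minute0 : Int := 1 + pvGetI distances_from_AA ((PySem.List.pyGet? path 0).getD "")
  let st := (path.zip path.tail).foldl
    (fun (st : Int × Int × Int) (pr : String × String) =>
      let travel_time := 1 + pvGetI (pvGetL distances_between_valves pr.1) pr.2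
      let ppm := st.2.1 + pvGetI valve_flow_rates pr.1
      (st.1 + travel_time, ppm, st.2.2 + travel_time * ppm))
    (minute0, 0, 0)
  st.2.2 + (time_available - st.1) * (st.2.1 + pvGetI valve_flow_rates ((PySem.List.pyGet? path (-1)).getD ""))

-- ===== PORT B =====
def calculate_pressure_released_alt (path : List String) (valve_flow_rates : List (String × Int)) (distances_between_valves : List (String × List (String × Int))) (distances_from_AA : List (String × Int)) (time_available : Int) : Int :=
  -- opening_minutes = accumulate(travel times, initial = 1 + distances_from_AA[path[0]])
  let opening_minutes : List Int :=
    List.scanl (· + ·) (1 + pvGetI distances_from_AA ((PySem.List.pyGet? path 0).getD ""))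
      ((path.zip path.tail).map (fun pr => 1 + pvGetI (pvGetL distances_between_valves pr.1) pr.2))
  ((path.zip opening_minutes).map
    (fun vm => pvGetI valve_flow_rates vm.1 * (time_available - vm.2))).sum

-- ===== PRECONDITION & SPEC =====
-- Pre_ excludes exactly the inputs where A raises: empty path (IndexError) or a missing
-- dict key along the path (KeyError); it excludes no input on which A returns.
def Pre_calculate_pressure_released (path : List String) (valve_flow_rates : List (String × Int)) (distances_between_valves : List (String × List (String × Int))) (distances_from_AA : List (String × Int)) (time_available : Int) : Prop :=
  path ≠ [] ∧
  (distances_from_AA.lookup path.headI).isSome = true ∧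
  (∀ v ∈ path, (valve_flow_rates.lookup v).isSome = true) ∧
  (∀ pr ∈ path.zip path.tail,
    ∃ row, distances_between_valves.lookup pr.1 = some row ∧ (row.lookup pr.2).isSome = true)
instance (path : List String) (valve_flow_rates : List (String × Int)) (distances_between_valves : List (String × List (String × Int))) (distances_from_AA : List (String × Int)) (time_available : Int) : Decidable (Pre_calculate_pressure_released path valve_flow_rates distances_between_valves distances_from_AA time_available) := by unfold Pre_calculate_pressure_released; infer_instance

def pvWitness_calculate_pressure_released : List String × (List (String × Int)) × (List (String × List (String × Int))) × (List (String × Int)) × Int :=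
  (["AA"], [("AA", 3)], [], [("AA", 2)], 10)

def Spec_calculate_pressure_released (path : List String) (valve_flow_rates : List (String × Int)) (distances_between_valves : List (String × List (String × Int))) (distances_from_AA : List (String × Int)) (time_available : Int) (out : Int) : Prop := out = calculate_pressure_released_alt path valve_flow_rates distances_between_valves distances_from_AA time_available
instance (path : List String) (valve_flow_rates : List (String × Int)) (distances_between_valves : List (String × List (String × Int))) (distances_from_AA : List (String × Int)) (time_available : Int) (out : Int) : Decidable (Spec_calculate_pressure_released path valve_flow_rates distances_between_valves distances_from_AA time_available out) := by unfold Spec_calculate_pressure_released; infer_instance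

-- ===== CLAIM (what is proved, stated in full; the proofs are below) =====
def Claim_equal_calculate_pressure_released : Prop := ∀ (path : List String) (valve_flow_rates : List (String × Int)) (distances_between_valves : List (String × List (String × Int))) (distances_from_AA : List (String × Int)) (time_available : Int), Dom_calculate_pressure_released path valve_flow_rates distances_between_valves distances_from_AA time_available → Pre_calculate_pressure_released path valve_flow_rates distances_between_valves distances_from_AA time_available → Spec_calculate_pressure_released path valve_flow_rates distances_between_valves distances_from_AA time_available (calculate_pressure_released path valve_flow_rates distances_between_valves distances_from_AA time_available)

-- ===== LEMMAS AND PROOFS =====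

-- The single induction: A's fold (minute, rate, released) versus B's scan-then-sum,
-- generalized over the head valve and the fold's starting state.
theorem pv_main (valve_flow_rates : List (String × Int)) (distances_between_valves : List (String × List (String × Int))) (time_available : Int)
    (rest : List String) :
    ∀ (v : String) (m p r : Int),
    ((fun (st : Int × Int × Int) =>
        st.2.2 + (time_available - st.1) * (st.2.1 + pvGetI valve_flow_rates ((PySem.List.pyGet? (v :: rest) (-1)).getD "")))
      (((v :: rest).zip rest).foldl
        (fun (st : Int × Int × Int) (pr : String × String) =>
          let travel_time := 1 + pvGetI (pvGetL distances_between_valves pr.1) pr.2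
          let ppm := st.2.1 + pvGetI valve_flow_rates pr.1
          (st.1 + travel_time, ppm, st.2.2 + travel_time * ppm))
        (m, p, r)))
    = r + (time_available - m) * p +
      (((v :: rest).zip (List.scanl (· + ·) m
          (((v :: rest).zip rest).map (fun pr => 1 + pvGetI (pvGetL distances_between_valves pr.1) pr.2)))).map
        (fun vm => pvGetI valve_flow_rates vm.1 * (time_available - vm.2))).sum := by
  induction rest with
  | nil =>
    intro v m p r
    simp [PySem.List.pyGet?_neg_one]
    ring
  | cons w rest ih =>
    intro v m p r
    have hlast : (PySem.List.pyGet? (v :: w :: rest) (-1)).getD ""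
        = (PySem.List.pyGet? (w :: rest) (-1)).getD "" := by
      rw [PySem.List.pyGet?_neg_one, PySem.List.pyGet?_neg_one]
      simp [List.getLast?_cons_cons]
    simp only [List.zip_cons_cons, List.foldl_cons, List.map_cons, List.scanl_cons, List.sum_cons,
      hlast]
    have ih' := ih w (m + (1 + pvGetI (pvGetL distances_between_valves v) w))
        (p + pvGetI valve_flow_rates v)
        (r + (1 + pvGetI (pvGetL distances_between_valves v) w) * (p + pvGetI valve_flow_rates v))
    simp only at ih'
    rw [ih']
    ring

-- ===== VERDICT (by name: the statement is the Claim_ definition above) =====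
theorem calculate_pressure_released_spec : Claim_equal_calculate_pressure_released := by
  intro path vfr dbv dAA T _hDom hPre
  obtain ⟨hne, -, -, -⟩ := hPre
  unfold Spec_calculate_pressure_released
  cases path with
  | nil => exact absurd rfl hne
  | cons v rest =>
    unfold calculate_pressure_released calculate_pressure_released_alt
    simp only [List.tail_cons]
    have h := pv_main vfr dbv T rest v (1 + pvGetI dAA ((PySem.List.pyGet? (v :: rest) 0).getD "")) 0 0
    simp only at h
    rw [h]
    ring
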